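-- pv_equiv track=rewrite | github.com/dwoz/python-urlio | urlio/dfs.py | depth_first_resources
-- ===== SOURCE A (Python) =====
-- def by_depth(x, y):
--     nx = len(x[0].split('\\'))
--     ny = len(y[0].split('\\'))
--     if nx < ny:
--         return -1
--     elif nx == ny:
--         return 0
--     else:
--         return 1
--
-- def cmp_to_key(mycmp):
--     'Convert a cmp= function into a key= function'
--     class K:
--         def __init__(self, obj, *args):
--             self.obj = obj
--         def __lt__(self, other):
--             return mycmp(self.obj, other.obj) < 0
--         def __gt__(self, other):
--             return mycmp(self.obj, other.obj) > 0
--         def __eq__(self, other):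
--             return mycmp(self.obj, other.obj) == 0
--         def __le__(self, other):
--             return mycmp(self.obj, other.obj) <= 0
--         def __ge__(self, other):
--             return mycmp(self.obj, other.obj) >= 0
--         def __ne__(self, other):
--             return mycmp(self.obj, other.obj) != 0
--     return K
--
-- def depth_first_resources(domain_cache):
--     resources = []
--     for ns in domain_cache.copy():
--         for resource in domain_cache[ns]:
--             path = "{0}\\{1}".format(
--                 ns.rstrip('\\'), resource.lstrip('\\')
--             ).rstrip('\\')
--             resources.append(
--                 (
--                     path,
--                     domain_cache[ns][resource]
--                 )
--             )
--     sorted_resources = sorted(resources, key=cmp_to_key(by_depth), reverse=True)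
--     return sorted_resources
-- ===== SOURCE B (Python) =====
-- def depth_first_resources(domain_cache):
--     # one fused pass: bucket each (path, value) by depth while flattening,
--     # then concatenate buckets from deepest to shallowest (a bucket sort;
--     # per-bucket insertion order matches the stable reverse comparison sort)
--     buckets = {}
--     for ns in domain_cache:
--         prefix = ns.rstrip('\\')
--         for name in domain_cache[ns]:
--             path = (prefix + '\\' + name.lstrip('\\')).rstrip('\\')
--             buckets.setdefault(len(path.split('\\')), []).append(
--                 (path, domain_cache[ns][name]))
--     return [item for d in sorted(buckets, reverse=True) for item in buckets[d]]
-- ===== Notes on version B (the rewrite author's own statement) =====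
-- stated objective: alternative
-- what changed: The flatten-then-comparison-sort (sorted with cmp_to_key over the whole list) is replaced by a single fused pass that buckets each (path, value) tuple by its depth into a dict while flattening, then concatenates the buckets in descending depth order (a bucket/counting sort; no intermediate resources list and no pairwise comparisons of paths).
import Mathlib
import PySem

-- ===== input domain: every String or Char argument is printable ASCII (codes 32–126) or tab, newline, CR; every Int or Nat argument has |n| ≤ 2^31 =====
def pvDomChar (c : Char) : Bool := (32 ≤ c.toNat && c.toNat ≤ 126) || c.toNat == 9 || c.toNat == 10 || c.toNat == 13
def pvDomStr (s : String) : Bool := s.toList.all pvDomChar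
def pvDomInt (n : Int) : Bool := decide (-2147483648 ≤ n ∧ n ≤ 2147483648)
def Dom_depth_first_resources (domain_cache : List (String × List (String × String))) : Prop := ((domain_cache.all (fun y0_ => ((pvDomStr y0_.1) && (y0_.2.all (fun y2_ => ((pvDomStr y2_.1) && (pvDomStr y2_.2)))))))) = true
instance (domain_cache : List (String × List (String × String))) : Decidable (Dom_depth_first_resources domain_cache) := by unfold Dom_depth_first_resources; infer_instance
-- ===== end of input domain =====

-- B replaces flatten + comparator sort by ONE fused pass that buckets tuples by depth while flattening, then concatenates buckets deepest-first (bucket sort); return values proved equal.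

-- ===== PORT A =====
-- s.rstrip('\\') / s.lstrip('\\'): ported by hand (PySem has no per-character one-sided strip); exact: drop the run of backslashes at that end.
def dfrRstripBackslash (s : String) : String :=
  String.ofList ((s.toList.reverse.dropWhile (fun c => c == '\\')).reverse)

def dfrLstripBackslash (s : String) : String :=
  String.ofList (s.toList.dropWhile (fun c => c == '\\'))

-- "{0}\\{1}".format(ns.rstrip('\\'), resource.lstrip('\\')).rstrip('\\')
def dfrPath (ns resource : String) : String :=
  dfrRstripBackslash (dfrRstripBackslash ns ++ "\\" ++ dfrLstripBackslash resource)

-- len(x[0].split('\\')) — the separator "\\" is non-empty, so split? is never none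
def dfrDepth (p : String × String) : Nat :=
  ((PySem.Str.split? p.1 "\\").getD []).length

-- A's flatten loop: append each (path, value) tuple to the growing resources list
def dfrFlatten (domain_cache : List (String × List (String × String))) : List (String × String) :=
  let d := PySem.Dict.ofList (domain_cache.map (fun q => (q.1, PySem.Dict.ofList q.2)))
  d.items.foldl (fun acc nsp =>
    nsp.2.items.foldl (fun acc2 rp => acc2 ++ [(dfrPath nsp.1 rp.1, rp.2)]) acc) []

def depth_first_resources (domain_cache : List (String × List (String × String))) : List (String × String) :=
  PySem.List.sorted (dfrFlatten domain_cache) dfrDepth true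

-- ===== PORT B =====
-- the same one-sided strips, written via List.rdropWhile / List.dropWhile
def altStripEndBS (s : String) : String := String.ofList (s.toList.rdropWhile (· == '\\'))

def altStripStartBS (s : String) : String := String.ofList (s.toList.dropWhile (· == '\\'))

-- len(path.split('\\'))
def altDepth (path : String) : Nat := ((PySem.Str.split? path "\\").getD []).length

-- fused pass: bucket each tuple by depth while flattening; then the comprehension
-- '[item for d in sorted(buckets, reverse=True) for item in buckets[d]]' as a flatMap
def depth_first_resources_alt (domain_cache : List (String × List (String × String))) : List (String × String) :=
  let d := PySem.Dict.ofList (domain_cache.map (fun q => (q.1, PySem.Dict.ofList q.2)))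
  let buckets : PySem.Dict Nat (List (String × String)) :=
    d.items.foldl (fun b nsp =>
      let pre := altStripEndBS nsp.1
      nsp.2.items.foldl (fun b2 rp =>
        let path := altStripEndBS (pre ++ "\\" ++ altStripStartBS rp.1)
        b2.modify (altDepth path) [] (fun l => l ++ [(path, rp.2)])) b)
      PySem.Dict.empty
  (PySem.List.sorted buckets.keys (fun k => k) true).flatMap (fun k => buckets.getD k [])

-- ===== PRECONDITION & SPEC =====
def Spec_depth_first_resources (domain_cache : List (String × List (String × String))) (out : List (String × String)) : Prop := out = depth_first_resources_alt domain_cache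
instance (domain_cache : List (String × List (String × String))) (out : List (String × String)) : Decidable (Spec_depth_first_resources domain_cache out) := by unfold Spec_depth_first_resources; infer_instance

-- ===== CLAIM (what is proved, stated in full; the proofs are below) =====
def Claim_equal_depth_first_resources : Prop := ∀ (domain_cache : List (String × List (String × String))), Dom_depth_first_resources domain_cache → Spec_depth_first_resources domain_cache (depth_first_resources domain_cache)

-- ===== LEMMAS AND PROOFS =====

theorem dfr_insertBy_append {α : Type} (before : α → α → Bool) (x : α) (p q : List α)
    (h : ∀ y ∈ p, before x y = false) :
    PySem.List.insertBy before x (p ++ q) = p ++ PySem.List.insertBy before x q := by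
  induction p with
  | nil => simp
  | cons a t ih =>
    have ha : before x a = false := h a (List.mem_cons_self ..)
    simp [PySem.List.insertBy, ha]
    exact ih (fun y hy => h y (List.mem_cons_of_mem _ hy))

theorem dfr_insertBy_cons {α : Type} (before : α → α → Bool) (x : α) (L : List α)
    (h : ∀ y ∈ L, before x y = true) :
    PySem.List.insertBy before x L = x :: L := by
  cases L with
  | nil => simp [PySem.List.insertBy]
  | cons a t => simp [PySem.List.insertBy, h a (List.mem_cons_self ..)]

theorem dfr_insert_flatMap {α : Type} (key : α → Nat) (x : α) (ds : List Nat) (F : Nat → List α)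
    (hd : ds.Pairwise (fun a b => b < a)) (hx : key x ∈ ds)
    (hF : ∀ d y, y ∈ F d → key y = d) :
    PySem.List.insertBy (fun a b => decide (key b < key a)) x (ds.flatMap F) =
      ds.flatMap (fun d => F d ++ if key x == d then [x] else []) := by
  induction ds with
  | nil => simp at hx
  | cons d ds' ih =>
    have hd' : ds'.Pairwise (fun a b => b < a) := (List.pairwise_cons.mp hd).2
    have hdlt : ∀ e ∈ ds', e < d := (List.pairwise_cons.mp hd).1
    by_cases hkx : key x = d
    · have hnot : ∀ y ∈ F d, (fun a b => decide (key b < key a)) x y = false := by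
        intro y hy; simp [hF d y hy, hkx]
      have hall : ∀ y ∈ ds'.flatMap F, (fun a b => decide (key b < key a)) x y = true := by
        intro y hy
        rcases List.mem_flatMap.mp hy with ⟨e, he, hye⟩
        simp [hF e y hye, hkx]
        exact hdlt e he
      rw [List.flatMap_cons, dfr_insertBy_append _ _ _ _ hnot,
        dfr_insertBy_cons _ _ _ hall, List.flatMap_cons]
      simp only [hkx, beq_self_eq_true, if_true]
      rw [List.append_assoc]
      congr 1
      congr 1
      exact List.flatMap_congr (fun e he => by
        have hlt := hdlt e he
        rw [if_neg (by simp only [beq_iff_eq]; omega), List.append_nil])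
    · have hx' : key x ∈ ds' := by
        rcases List.mem_cons.mp hx with h | h
        · exact absurd h hkx
        · exact h
      have hnot : ∀ y ∈ F d, (fun a b => decide (key b < key a)) x y = false := by
        intro y hy
        simp [hF d y hy]
        exact Nat.le_of_lt (hdlt _ hx')
      rw [List.flatMap_cons, dfr_insertBy_append _ _ _ _ hnot, ih hd' hx', List.flatMap_cons]
      have : (key x == d) = false := by simp [hkx]
      simp [this]

-- stable descending sort = concatenation of the depth buckets, largest depth first
theorem dfr_sorted_rev_eq_flatMap {α : Type} (key : α → Nat) (xs : List α) (ds : List Nat)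
    (hd : ds.Pairwise (fun a b => b < a)) (hmem : ∀ x ∈ xs, key x ∈ ds) :
    PySem.List.sorted xs key true = ds.flatMap (fun d => xs.filter (fun x => key x == d)) := by
  induction xs using List.reverseRecOn with
  | nil => simp [PySem.List.sorted]
  | append_singleton xs x ih =>
    have hx : key x ∈ ds := hmem x (by simp)
    have hmem' : ∀ y ∈ xs, key y ∈ ds := fun y hy => hmem y (by simp [hy])
    rw [PySem.List.sorted_rev_eq_foldl_insertBy, List.foldl_append, List.foldl_cons, List.foldl_nil,
      ← PySem.List.sorted_rev_eq_foldl_insertBy, ih hmem',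
      dfr_insert_flatMap key x ds _ hd hx (by intro d y hy; exact of_decide_eq_true (by simpa using (List.mem_filter.mp hy).2))]
    exact List.flatMap_congr (fun d _ => by
      rw [List.filter_append]
      congr 1
      by_cases h : key x = d
      · simp [List.filter, h]
      · have hb : (key x == d) = false := by simp [h]
        simp [List.filter, hb])

-- the bucket-building fold: its keys are the distinct depths in first-occurrence order …
theorem dfr_keys_buckets {α : Type} (key : α → Nat) (xs : List α) :
    (xs.foldl (fun b x => b.modify (key x) [] (fun l => l ++ [x])) PySem.Dict.empty).keys
      = PySem.Set.ofList (xs.map key) := by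
  induction xs using List.reverseRecOn with
  | nil => simp [PySem.Dict.keys_empty]
  | append_singleton xs x ih =>
    rw [List.foldl_append, List.foldl_cons, List.foldl_nil]
    simp only [List.map_append, List.map_cons, List.map_nil]
    rw [PySem.Set.ofList_append_singleton, PySem.Dict.keys_modify]
    set d := xs.foldl (fun b x => b.modify (key x) [] (fun l => l ++ [x])) PySem.Dict.empty with hdd
    by_cases hc : d.contains (key x) = true
    · rw [PySem.Dict.keys_insert_of_contains _ _ hc, ih, PySem.Set.add]
      have : PySem.Set.contains (PySem.Set.ofList (xs.map key)) (key x) = true := by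
        have := (PySem.Dict.contains_iff_mem_keys (d := d) (k := key x)).mp hc
        rw [ih] at this
        simpa [PySem.Set.contains] using this
      rw [if_pos this]
    · rw [PySem.Dict.keys_insert_of_not_contains _ _ (by simpa using hc), ih, PySem.Set.add]
      have : ¬ PySem.Set.contains (PySem.Set.ofList (xs.map key)) (key x) = true := by
        intro hmem
        apply hc
        apply (PySem.Dict.contains_iff_mem_keys (d := d) (k := key x)).mpr
        rw [ih]
        simpa [PySem.Set.contains] using hmem
      rw [if_neg this]

-- … and each bucket holds exactly its depth's tuples, in original order
theorem dfr_getD_buckets {α : Type} (key : α → Nat) (xs : List α) (k : Nat) :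
    (xs.foldl (fun b x => b.modify (key x) [] (fun l => l ++ [x])) PySem.Dict.empty).getD k []
      = xs.filter (fun x => key x == k) := by
  induction xs using List.reverseRecOn with
  | nil => simp [PySem.Dict.getD_empty]
  | append_singleton xs x ih =>
    rw [List.foldl_append, List.foldl_cons, List.foldl_nil, PySem.Dict.getD_modify,
      List.filter_append]
    by_cases hk : k = key x
    · subst hk
      rw [if_pos rfl, ih]
      simp [List.filter]
    · rw [if_neg hk, ih]
      have : (key x == k) = false := by simpa using (Ne.symm hk)
      simp [List.filter, this]

-- A's flatten loop written as a flatMap over the dict's items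
theorem dfr_flatten_eq_flatMap (domain_cache : List (String × List (String × String))) :
    dfrFlatten domain_cache
      = (PySem.Dict.ofList (domain_cache.map (fun q => (q.1, PySem.Dict.ofList q.2)))).items.flatMap
          (fun nsp => nsp.2.items.map (fun rp => (dfrPath nsp.1 rp.1, rp.2))) := by
  unfold dfrFlatten
  set items := (PySem.Dict.ofList (domain_cache.map (fun q => (q.1, PySem.Dict.ofList q.2)))).items
  have h : ∀ (l : List (String × PySem.Dict String String)) (acc : List (String × String)),
      l.foldl (fun acc nsp =>
        nsp.2.items.foldl (fun acc2 rp => acc2 ++ [(dfrPath nsp.1 rp.1, rp.2)]) acc) acc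
      = acc ++ l.flatMap (fun nsp => nsp.2.items.map (fun rp => (dfrPath nsp.1 rp.1, rp.2))) := by
    intro l
    induction l with
    | nil => simp
    | cons nsp t ih =>
      intro acc
      rw [List.foldl_cons, ih, PySem.List.foldl_append_singleton_eq_map, List.flatMap_cons,
        List.append_assoc]
  exact h items []

-- B's fused loop builds exactly the bucket fold over A's flattened list
theorem dfr_fused_buckets (domain_cache : List (String × List (String × String))) :
    ((PySem.Dict.ofList (domain_cache.map (fun q => (q.1, PySem.Dict.ofList q.2)))).items.foldl
        (fun b nsp =>
          nsp.2.items.foldl (fun b2 rp =>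
            b2.modify (altDepth (altStripEndBS (altStripEndBS nsp.1 ++ "\\" ++ altStripStartBS rp.1))) []
              (fun l => l ++ [(altStripEndBS (altStripEndBS nsp.1 ++ "\\" ++ altStripStartBS rp.1), rp.2)])) b)
        PySem.Dict.empty)
      = (dfrFlatten domain_cache).foldl
          (fun b item => b.modify (dfrDepth item) [] (fun l => l ++ [item])) PySem.Dict.empty := by
  rw [dfr_flatten_eq_flatMap, List.foldl_flatMap]
  simp only [List.foldl_map]
  rfl

-- ===== VERDICT (by name: the statement is the Claim_ definition above) =====
theorem depth_first_resources_spec : Claim_equal_depth_first_resources := by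
  intro dc _
  unfold Spec_depth_first_resources depth_first_resources depth_first_resources_alt
  simp only []
  rw [dfr_fused_buckets]
  set xs := dfrFlatten dc with hxs
  set buckets := xs.foldl (fun b item => b.modify (dfrDepth item) [] (fun l => l ++ [item])) PySem.Dict.empty with hb
  have hkeys : buckets.keys = PySem.Set.ofList (xs.map dfrDepth) := dfr_keys_buckets dfrDepth xs
  rw [hkeys]
  set ds := PySem.List.sorted (PySem.Set.ofList (xs.map dfrDepth)) (fun k => k) true with hds
  have hperm : ds.Perm (PySem.Set.ofList (xs.map dfrDepth)) := PySem.List.sorted_perm _ _ _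
  have hnd : ds.Nodup := hperm.symm.nodup (PySem.Set.nodup_ofList _)
  have hle : ds.Pairwise (fun a b => b ≤ a) := PySem.List.sorted_pairwise_rev _ _
  have hd : ds.Pairwise (fun a b => b < a) :=
    (hle.and hnd).imp (fun h => lt_of_le_of_ne h.1 (Ne.symm h.2))
  have hmem : ∀ x ∈ xs, dfrDepth x ∈ ds := by
    intro x hx
    rw [hds, PySem.List.mem_sorted, PySem.Set.mem_ofList]
    exact List.mem_map_of_mem hx
  rw [dfr_sorted_rev_eq_flatMap dfrDepth xs ds hd hmem]
  exact List.flatMap_congr (fun d _ => (dfr_getD_buckets dfrDepth xs d).symm)
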